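-- pv_equiv track=rewrite | github.com/tech9md/vibelympics | round_2/backend/app/hooks/core.py | find_similar_packages
-- ===== SOURCE A (Python) =====
-- from typing import List, Tuple
--
-- def levenshtein_distance(s1: str, s2: str) -> int:
--     """Calculate Levenshtein (edit) distance between two strings.
--
--     Args:
--         s1: First string to compare
--         s2: Second string to compare
--
--     Returns:
--         Minimum number of edits needed
--     """
--     # Optimization: ensure s1 is the longer string
--     if len(s1) < len(s2):
--         return levenshtein_distance(s2, s1)
--
--     # Base case: if s2 is empty, distance is length of s1
--     if len(s2) == 0:
--         return len(s1)
--
--     # Dynamic programming: maintain previous row of distances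
--     previous_row = range(len(s2) + 1)
--     for i, c1 in enumerate(s1):
--         # Current row starts with distance from empty string
--         current_row = [i + 1]
--         for j, c2 in enumerate(s2):
--             # Calculate cost of each operation
--             insertions = previous_row[j + 1] + 1  # Add character from s2
--             deletions = current_row[j] + 1  # Remove character from s1
--             substitutions = previous_row[j] + (c1 != c2)  # Replace if different
--             # Take minimum cost operation
--             current_row.append(min(insertions, deletions, substitutions))
--         previous_row = current_row
--
--     return previous_row[-1]
--
-- def find_similar_packages(
--     name: str, packages: List[str]
-- ) -> List[Tuple[str, int, int]]:
--     """Find packages within edit distance threshold.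
--
--     Args:
--         name: Package name (normalized)
--         packages: List of popular packages
--
--     Returns:
--         List of (package_name, distance, rank) tuples
--     """
--     results = []
--
--     for rank, pkg in enumerate(packages, 1):
--         pkg_normalized = pkg.lower().replace("-", "").replace("_", "")
--         if pkg_normalized == name:
--             continue
--
--         distance = levenshtein_distance(name, pkg_normalized)
--
--         # Only consider close matches
--         if distance <= 2:
--             results.append((pkg, distance, rank))
--
--     # Sort by distance, then by rank
--     results.sort(key=lambda x: (x[1], x[2]))
--     return results[:5]  # Return top 5 matches
-- ===== SOURCE B (Python) =====
-- from typing import List, Tuple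
--
-- def _lev(a: str, b: str) -> int:
--     """Full Levenshtein DP, rows indexed by a, outer loop over b."""
--     row = list(range(len(a) + 1))
--     for j, cb in enumerate(b):
--         new = [j + 1]
--         for i, ca in enumerate(a):
--             new.append(min(row[i + 1] + 1, new[i] + 1, row[i] + (cb != ca)))
--         row = new
--     return row[-1]
--
-- def find_similar_packages(
--     name: str, packages: List[str]
-- ) -> List[Tuple[str, int, int]]:
--     """Find packages within edit distance threshold.
--
--     Length prefilter: |len difference| > 2 already implies distance > 2,
--     so the DP is skipped for those candidates.  Results are collected into
--     per-distance buckets in rank order, so no sort is needed at the end.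
--     """
--     buckets = ([], [], [])  # distance 0 (never hit: equal names are skipped), 1, 2
--     for rank, pkg in enumerate(packages, 1):
--         norm = pkg.lower().replace("-", "").replace("_", "")
--         if norm == name or abs(len(norm) - len(name)) > 2:
--             continue
--         d = _lev(name, norm)
--         if d <= 2:
--             buckets[d].append((pkg, d, rank))
--     merged = buckets[0] + buckets[1] + buckets[2]
--     return merged[:5]
-- ===== Notes on version B (the rewrite author's own statement) =====
-- stated objective: faster
-- what changed: B skips the O(n*m) DP entirely for any package whose normalized length differs from the name's by more than 2 (edit distance is at least the length difference), runs the DP transposed without A's swap/empty special cases, and collects matches into per-distance buckets in rank order so the final sort disappears.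
import Mathlib
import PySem

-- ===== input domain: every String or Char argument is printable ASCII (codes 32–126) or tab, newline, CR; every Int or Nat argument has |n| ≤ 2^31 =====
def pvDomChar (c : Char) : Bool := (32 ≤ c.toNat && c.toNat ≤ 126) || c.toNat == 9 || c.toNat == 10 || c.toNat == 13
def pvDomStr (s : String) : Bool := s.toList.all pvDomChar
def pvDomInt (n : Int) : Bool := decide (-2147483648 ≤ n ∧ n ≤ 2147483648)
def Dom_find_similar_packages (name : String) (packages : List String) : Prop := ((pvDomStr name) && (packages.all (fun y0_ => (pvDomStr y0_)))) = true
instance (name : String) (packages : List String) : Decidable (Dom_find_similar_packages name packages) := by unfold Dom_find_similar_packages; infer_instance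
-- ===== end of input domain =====

-- B replaces A's full scan (DP for every package, then a sort) by a length-difference
-- prefilter that skips the DP for most candidates and by per-distance buckets that make
-- the final sort unnecessary; same return value everywhere.

-- ===== PORT A =====
def levenshtein_distance (s1 s2 : String) : Int :=
  if PySem.Str.len s1 < PySem.Str.len s2 then levenshtein_distance s2 s1
  else if PySem.Str.len s2 = 0 then PySem.Str.len s1
  else
    let previous_row : List Int := PySem.List.pyRange 0 (PySem.Str.len s2 + 1) 1
    let final_row := (PySem.List.enumerate s1.toList).foldl
      (fun previous_row ic =>
        (PySem.List.enumerate s2.toList).foldl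
          (fun current_row jc =>
            let insertions := PySem.List.pyGetD previous_row (jc.1 + 1) 0 + 1
            let deletions := PySem.List.pyGetD current_row jc.1 0 + 1
            let substitutions := PySem.List.pyGetD previous_row jc.1 0 + (if ic.2 ≠ jc.2 then 1 else 0)
            current_row ++ [min insertions (min deletions substitutions)])
          [ic.1 + 1])
      previous_row
    PySem.List.pyGetD final_row (-1) 0
termination_by (PySem.Str.len s2).toNat
decreasing_by simp only [PySem.Str.len_eq] at *; omega

def find_similar_packages (name : String) (packages : List String) : List (String × Int × Int) :=
  let results := (PySem.List.enumerate packages 1).foldl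
    (fun results rp =>
      let pkg_normalized := PySem.Str.replace (PySem.Str.replace (PySem.Str.lower rp.2) "-" "") "_" ""
      if pkg_normalized == name then results
      else
        let distance := levenshtein_distance name pkg_normalized
        if distance ≤ 2 then results ++ [(rp.2, distance, rp.1)] else results)
    []
  PySem.List.slice (PySem.List.sorted2 results (fun x => x.2.1) (fun x => x.2.2)) none (some 5)

-- ===== PORT B =====
def b_lev (a b : String) : Int :=
  let row : List Int := PySem.List.pyRange 0 (PySem.Str.len a + 1) 1
  let final := (PySem.List.enumerate b.toList).foldl
    (fun row jc =>
      (PySem.List.enumerate a.toList).foldl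
        (fun new ic =>
          new ++ [min (PySem.List.pyGetD row (ic.1 + 1) 0 + 1)
              (min (PySem.List.pyGetD new ic.1 0 + 1)
                   (PySem.List.pyGetD row ic.1 0 + (if jc.2 ≠ ic.2 then 1 else 0)))])
        [jc.1 + 1])
    row
  PySem.List.pyGetD final (-1) 0

def find_similar_packages_alt (name : String) (packages : List String) : List (String × Int × Int) :=
  let bs := (PySem.List.enumerate packages 1).foldl
    (fun (bs : List (String × Int × Int) × List (String × Int × Int) × List (String × Int × Int)) rp =>
      let norm := PySem.Str.replace (PySem.Str.replace (PySem.Str.lower rp.2) "-" "") "_" ""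
      if norm == name ∨ 2 < |PySem.Str.len norm - PySem.Str.len name| then bs
      else
        let d := b_lev name norm
        if d ≤ 2 then
          if d = 0 then (bs.1 ++ [(rp.2, d, rp.1)], bs.2.1, bs.2.2)
          else if d = 1 then (bs.1, bs.2.1 ++ [(rp.2, d, rp.1)], bs.2.2)
          else (bs.1, bs.2.1, bs.2.2 ++ [(rp.2, d, rp.1)])
        else bs)
    ([], [], [])
  PySem.List.slice (bs.1 ++ bs.2.1 ++ bs.2.2) none (some 5)

-- ===== PRECONDITION & SPEC =====
def Spec_find_similar_packages (name : String) (packages : List String) (out : List (String × Int × Int)) : Prop := out = find_similar_packages_alt name packages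
instance (name : String) (packages : List String) (out : List (String × Int × Int)) : Decidable (Spec_find_similar_packages name packages out) := by unfold Spec_find_similar_packages; infer_instance

-- ===== CLAIM (what is proved, stated in full; the proofs are below) =====
def Claim_equal_find_similar_packages : Prop := ∀ (name : String) (packages : List String), Dom_find_similar_packages name packages → Spec_find_similar_packages name packages (find_similar_packages name packages)

-- ===== LEMMAS AND PROOFS =====

-- Reference edit distance, peeling characters from the front.
def levR : List Char → List Char → Int
  | [], t => (t.length : Int)
  | _ :: s, [] => (s.length : Int) + 1
  | a :: s, b :: t =>
      min (levR s (b :: t) + 1)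
        (min (levR (a :: s) t + 1) (levR s t + (if a = b then 0 else 1)))
termination_by s t => s.length + t.length

lemma levR_nil_right (s : List Char) : levR s [] = (s.length : Int) := by
  cases s <;> simp [levR]

lemma levR_bounds (s t : List Char) : 0 ≤ levR s t ∧ |(s.length : Int) - (t.length : Int)| ≤ levR s t := by
  fun_induction levR s t with
  | case1 t => simp only [abs_sub_le_iff, List.length_nil]; push_cast; omega
  | case2 a s => simp only [abs_sub_le_iff, List.length_cons, List.length_nil]; push_cast; omega
  | case3 a s b t ih1 ih2 ih3 =>
      simp only [abs_sub_le_iff, List.length_cons] at *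
      split_ifs at * <;> push_cast at * <;> omega

lemma levR_comm (s t : List Char) : levR s t = levR t s := by
  fun_induction levR s t with
  | case1 t => rw [levR_nil_right]
  | case2 a s => simp [levR]
  | case3 a s b t ih1 ih2 ih3 =>
      have hr : levR (b :: t) (a :: s) = min (levR t (a :: s) + 1)
          (min (levR (b :: t) s + 1) (levR t s + if b = a then 0 else 1)) := by
        simp only [levR]
      rw [hr, ih1, ih2, ih3]
      have hc : (if a = b then (0:Int) else 1) = (if b = a then 0 else 1) := by
        by_cases h : a = b
        · simp [h]
        · simp [h, (Ne.symm h : b ≠ a)]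
      rw [hc]
      omega

-- The DP engine shared (up to argument order) by the two ports.
def dpRun (s1 s2 : String) : Int :=
  PySem.List.pyGetD
    ((PySem.List.enumerate s1.toList).foldl
      (fun previous_row ic =>
        (PySem.List.enumerate s2.toList).foldl
          (fun current_row jc =>
            current_row ++ [min (PySem.List.pyGetD previous_row (jc.1 + 1) 0 + 1)
              (min (PySem.List.pyGetD current_row jc.1 0 + 1)
                   (PySem.List.pyGetD previous_row jc.1 0 + (if ic.2 ≠ jc.2 then 1 else 0)))])
          [ic.1 + 1])
      (PySem.List.pyRange 0 (PySem.Str.len s2 + 1) 1)) (-1) 0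

lemma pyGetD_neg_one {α : Type} (xs : List α) (d : α) (h : xs ≠ []) :
    PySem.List.pyGetD xs (-1) d = xs.getD (xs.length - 1) d := by
  have hl : 0 < xs.length := List.length_pos_iff.mpr h
  simp only [PySem.List.pyGetD, PySem.List.pyGet?, PySem.List.pyIdx?]
  rw [if_neg (by omega), if_pos (by exact_mod_cast by omega : -(xs.length : Int) ≤ -1)]
  simp [List.getD]

lemma take_rev_succ (t : List Char) (k : Nat) (hk : k < t.length) :
    (t.take (k + 1)).reverse = t[k] :: (t.take k).reverse := by
  rw [List.take_add_one]
  simp [List.getElem?_eq_getElem hk]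

lemma dp_inner (t : String) (c1 : Char) (r : List Char) (prev : List Int)
    (hprev : prev = (List.range (t.toList.length + 1)).map (fun j => levR r ((t.toList.take j).reverse))) :
    ∀ (t' : List Char) (k : Nat) (cur : List Int),
      t.toList.drop k = t' → k ≤ t.toList.length →
      cur = (List.range (k + 1)).map (fun j => levR (c1 :: r) ((t.toList.take j).reverse)) →
      (PySem.List.enumerate t' (k : Int)).foldl
        (fun current_row jc =>
          current_row ++ [min (PySem.List.pyGetD prev (jc.1 + 1) 0 + 1)
            (min (PySem.List.pyGetD current_row jc.1 0 + 1)
                 (PySem.List.pyGetD prev jc.1 0 + (if c1 ≠ jc.2 then 1 else 0)))]) cur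
      = (List.range (t.toList.length + 1)).map (fun j => levR (c1 :: r) ((t.toList.take j).reverse)) := by
  intro t'
  induction t' with
  | nil =>
      intro k cur hdrop hk hcur
      rw [PySem.List.enumerate_nil, List.foldl_nil, hcur]
      have hlen := congrArg List.length hdrop
      rw [List.length_drop] at hlen
      simp only [List.length_nil] at hlen
      have : k = t.toList.length := by omega
      rw [this]
  | cons c2 t'' ih =>
      intro k cur hdrop hk hcur
      have hklt : k < t.toList.length := by
        rcases Nat.lt_or_ge k t.toList.length with h | h
        · exact h
        · rw [List.drop_eq_nil_of_le h] at hdrop; simp at hdrop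
      rw [List.drop_eq_getElem_cons hklt] at hdrop
      have hc2 : t.toList[k] = c2 := (List.cons.inj hdrop).1
      have ht'' : t.toList.drop (k + 1) = t'' := (List.cons.inj hdrop).2
      rw [PySem.List.enumerate_cons, List.foldl_cons]
      dsimp only
      have hprev1 : PySem.List.pyGetD prev ((k : Int) + 1) 0
          = levR r ((t.toList.take (k + 1)).reverse) := by
        rw [hprev]
        have hcast : ((k : Int) + 1) = ((k + 1 : Nat) : Int) := by push_cast; ring
        rw [hcast, PySem.List.pyGetD_natCast, PySem.List.getD_map_range _ _ _ _ (by omega)]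
      have hprev0 : PySem.List.pyGetD prev ((k : Int)) 0
          = levR r ((t.toList.take k).reverse) := by
        rw [hprev, PySem.List.pyGetD_natCast, PySem.List.getD_map_range _ _ _ _ (by omega)]
      have hcur0 : PySem.List.pyGetD cur ((k : Int)) 0
          = levR (c1 :: r) ((t.toList.take k).reverse) := by
        rw [hcur, PySem.List.pyGetD_natCast, PySem.List.getD_map_range _ _ _ _ (by omega)]
      have hcell : min (PySem.List.pyGetD prev ((k : Int) + 1) 0 + 1)
            (min (PySem.List.pyGetD cur ((k : Int)) 0 + 1)
                 (PySem.List.pyGetD prev ((k : Int)) 0 + (if c1 ≠ c2 then 1 else 0)))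
          = levR (c1 :: r) ((t.toList.take (k + 1)).reverse) := by
        rw [hprev1, hprev0, hcur0]
        have hrec : levR (c1 :: r) ((t.toList.take (k + 1)).reverse)
            = min (levR r ((t.toList.take (k + 1)).reverse) + 1)
                (min (levR (c1 :: r) ((t.toList.take k).reverse) + 1)
                     (levR r ((t.toList.take k).reverse) + if c1 = c2 then 0 else 1)) := by
          rw [take_rev_succ t.toList k hklt, hc2]
          simp only [levR]
        rw [hrec]
        by_cases hcc : c1 = c2 <;> simp [hcc]
      rw [hcell]
      have hnext : cur ++ [levR (c1 :: r) ((t.toList.take (k + 1)).reverse)]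
          = (List.range (k + 1 + 1)).map (fun j => levR (c1 :: r) ((t.toList.take j).reverse)) := by
        rw [List.range_succ, List.map_append, hcur]
        simp
      rw [hnext]
      have hcast : (k : Int) + 1 = ((k + 1 : Nat) : Int) := by push_cast; ring
      rw [hcast]
      exact ih (k + 1) _ ht'' (by omega) rfl

lemma dp_outer (t : String) :
    ∀ (s' : List Char) (r : List Char) (prev : List Int),
      prev = (List.range (t.toList.length + 1)).map (fun j => levR r ((t.toList.take j).reverse)) →
      (PySem.List.enumerate s' (r.length : Int)).foldl
        (fun previous_row ic =>
          (PySem.List.enumerate t.toList).foldl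
            (fun current_row jc =>
              current_row ++ [min (PySem.List.pyGetD previous_row (jc.1 + 1) 0 + 1)
                (min (PySem.List.pyGetD current_row jc.1 0 + 1)
                     (PySem.List.pyGetD previous_row jc.1 0 + (if ic.2 ≠ jc.2 then 1 else 0)))])
            [ic.1 + 1]) prev
      = (List.range (t.toList.length + 1)).map (fun j => levR (s'.reverse ++ r) ((t.toList.take j).reverse)) := by
  intro s'
  induction s' with
  | nil => intro r prev hprev; rw [PySem.List.enumerate_nil, List.foldl_nil, hprev]; simp
  | cons c s' ih =>
      intro r prev hprev
      rw [PySem.List.enumerate_cons, List.foldl_cons]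
      dsimp only
      have happ := dp_inner t c r prev hprev t.toList 0 [(r.length : Int) + 1] (by simp) (by omega)
        (by simp [List.range_succ, levR_nil_right])
      simp only [Nat.cast_zero] at happ
      rw [happ]
      have hlen : (r.length : Int) + 1 = (((c :: r).length : Nat) : Int) := by simp
      rw [hlen, ih (c :: r) _ rfl]
      simp

lemma dpRun_eq (s t : String) : dpRun s t = levR s.toList.reverse t.toList.reverse := by
  unfold dpRun
  have hinit : (PySem.List.pyRange 0 (PySem.Str.len t + 1) 1 : List Int)
      = (List.range (t.toList.length + 1)).map (fun j => levR ([] : List Char) ((t.toList.take j).reverse)) := by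
    rw [PySem.Str.len_eq]
    have hcast : ((t.toList.length : Int) + 1) = ((t.toList.length + 1 : Nat) : Int) := by push_cast; ring
    rw [hcast, PySem.List.pyRange_zero_natCast]
    apply List.map_congr_left
    intro j hj
    simp only [List.mem_range] at hj
    have : levR ([] : List Char) ((t.toList.take j).reverse)
        = (((t.toList.take j).reverse).length : Int) := by simp only [levR]
    rw [this, List.length_reverse, List.length_take]
    omega
  rw [hinit]
  have houter := dp_outer t s.toList [] _ rfl
  simp only [List.length_nil, Nat.cast_zero, List.append_nil] at houter
  rw [houter, pyGetD_neg_one _ _ (by simp), List.length_map, List.length_range]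
  simp only [Nat.add_sub_cancel]
  rw [PySem.List.getD_map_range _ _ _ _ (by omega), List.take_length]

lemma levA_noswap (s1 s2 : String) (h : ¬ PySem.Str.len s1 < PySem.Str.len s2) :
    levenshtein_distance s1 s2 = levR s1.toList.reverse s2.toList.reverse := by
  rw [levenshtein_distance]
  rw [if_neg h]
  by_cases h0 : PySem.Str.len s2 = 0
  · rw [if_pos h0]
    have : s2.toList = [] := by
      rw [PySem.Str.len_eq] at h0
      exact List.length_eq_zero_iff.mp (by exact_mod_cast h0)
    rw [this]
    simp only [List.reverse_nil, levR_nil_right, List.length_reverse]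
    rw [PySem.Str.len_eq]
  · rw [if_neg h0]
    exact dpRun_eq s1 s2

lemma levA_eq (s1 s2 : String) : levenshtein_distance s1 s2 = levR s1.toList.reverse s2.toList.reverse := by
  by_cases h : PySem.Str.len s1 < PySem.Str.len s2
  · rw [levenshtein_distance, if_pos h, levA_noswap s2 s1 (by omega), levR_comm]
  · exact levA_noswap s1 s2 h

lemma levB_eq (a b : String) : b_lev a b = levR a.toList.reverse b.toList.reverse := by
  have h : b_lev a b = dpRun b a := rfl
  rw [h, dpRun_eq, levR_comm]

-- Comparison used by Python's stable sort on the key (distance, rank).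
def ltKey (a b : String × Int × Int) : Bool :=
  decide (a.2.1 < b.2.1) || (!decide (b.2.1 < a.2.1) && decide (a.2.2 < b.2.2))

lemma sorted2_foldl (xs : List (String × Int × Int)) :
    PySem.List.sorted2 xs (fun x => x.2.1) (fun x => x.2.2) false
      = xs.foldl (fun acc x => PySem.List.insertBy ltKey x acc) [] := rfl

lemma ltKey_eq_false (x y : String × Int × Int) (h1 : y.2.1 ≤ x.2.1) (h2 : y.2.2 < x.2.2) :
    ltKey x y = false := by
  simp only [ltKey, Bool.or_eq_false_iff, Bool.and_eq_false_iff,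
    decide_eq_false_iff_not]
  omega

lemma ltKey_eq_true (x y : String × Int × Int) (h : x.2.1 < y.2.1) : ltKey x y = true := by
  simp only [ltKey, Bool.or_eq_true, decide_eq_true_eq]
  exact Or.inl h

lemma insertBy_prefix {α : Type} (before : α → α → Bool) (x : α) (l t : List α)
    (h : ∀ y ∈ l, before x y = false) :
    PySem.List.insertBy before x (l ++ t) = l ++ PySem.List.insertBy before x t := by
  induction l with
  | nil => simp
  | cons a l ihl =>
      have ha : before x a = false := h a (by simp)
      rw [List.cons_append, PySem.List.insertBy]
      simp only [ha, Bool.false_eq_true, if_false]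
      rw [ihl (fun y hy => h y (by simp [hy])), List.cons_append]

lemma insertBy_front {α : Type} (before : α → α → Bool) (x : α) (t : List α)
    (h : ∀ y ∈ t, before x y = true) :
    PySem.List.insertBy before x t = x :: t := by
  cases t with
  | nil => rw [PySem.List.insertBy]
  | cons a t => rw [PySem.List.insertBy, if_pos (h a (by simp))]

lemma buckets_mono {b : List (String × Int × Int)} {v r0 : Int}
    (h : ∀ x ∈ b, x.2.1 = v ∧ x.2.2 < r0) : ∀ x ∈ b, x.2.1 = v ∧ x.2.2 < r0 + 1 :=
  fun x hx => ⟨(h x hx).1, by have := (h x hx).2; omega⟩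

lemma loop_master (name : String) (pkgs : List String) :
    ∀ (r0 : Int) (accA b0 b1 b2 : List (String × Int × Int)),
      accA.foldl (fun acc x => PySem.List.insertBy ltKey x acc) [] = b0 ++ b1 ++ b2 →
      (∀ x ∈ b0, x.2.1 = 0 ∧ x.2.2 < r0) →
      (∀ x ∈ b1, x.2.1 = 1 ∧ x.2.2 < r0) →
      (∀ x ∈ b2, x.2.1 = 2 ∧ x.2.2 < r0) →
      ((PySem.List.enumerate pkgs r0).foldl
          (fun results rp =>
            if (PySem.Str.replace (PySem.Str.replace (PySem.Str.lower rp.2) "-" "") "_" "") == name then results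
            else
              if levR name.toList.reverse (PySem.Str.replace (PySem.Str.replace (PySem.Str.lower rp.2) "-" "") "_" "").toList.reverse ≤ 2 then
                results ++ [(rp.2, levR name.toList.reverse (PySem.Str.replace (PySem.Str.replace (PySem.Str.lower rp.2) "-" "") "_" "").toList.reverse, rp.1)]
              else results)
          accA).foldl (fun acc x => PySem.List.insertBy ltKey x acc) []
      = (((PySem.List.enumerate pkgs r0).foldl
          (fun bs rp =>
            if ((PySem.Str.replace (PySem.Str.replace (PySem.Str.lower rp.2) "-" "") "_" "") == name) ∨ 2 < |PySem.Str.len (PySem.Str.replace (PySem.Str.replace (PySem.Str.lower rp.2) "-" "") "_" "") - PySem.Str.len name| then bs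
            else
              if levR name.toList.reverse (PySem.Str.replace (PySem.Str.replace (PySem.Str.lower rp.2) "-" "") "_" "").toList.reverse ≤ 2 then
                if levR name.toList.reverse (PySem.Str.replace (PySem.Str.replace (PySem.Str.lower rp.2) "-" "") "_" "").toList.reverse = 0 then
                  (bs.1 ++ [(rp.2, levR name.toList.reverse (PySem.Str.replace (PySem.Str.replace (PySem.Str.lower rp.2) "-" "") "_" "").toList.reverse, rp.1)], bs.2.1, bs.2.2)
                else if levR name.toList.reverse (PySem.Str.replace (PySem.Str.replace (PySem.Str.lower rp.2) "-" "") "_" "").toList.reverse = 1 then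
                  (bs.1, bs.2.1 ++ [(rp.2, levR name.toList.reverse (PySem.Str.replace (PySem.Str.replace (PySem.Str.lower rp.2) "-" "") "_" "").toList.reverse, rp.1)], bs.2.2)
                else
                  (bs.1, bs.2.1, bs.2.2 ++ [(rp.2, levR name.toList.reverse (PySem.Str.replace (PySem.Str.replace (PySem.Str.lower rp.2) "-" "") "_" "").toList.reverse, rp.1)])
              else bs)
          (b0, b1, b2)).1
        ++ ((PySem.List.enumerate pkgs r0).foldl
          (fun bs rp =>
            if ((PySem.Str.replace (PySem.Str.replace (PySem.Str.lower rp.2) "-" "") "_" "") == name) ∨ 2 < |PySem.Str.len (PySem.Str.replace (PySem.Str.replace (PySem.Str.lower rp.2) "-" "") "_" "") - PySem.Str.len name| then bs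
            else
              if levR name.toList.reverse (PySem.Str.replace (PySem.Str.replace (PySem.Str.lower rp.2) "-" "") "_" "").toList.reverse ≤ 2 then
                if levR name.toList.reverse (PySem.Str.replace (PySem.Str.replace (PySem.Str.lower rp.2) "-" "") "_" "").toList.reverse = 0 then
                  (bs.1 ++ [(rp.2, levR name.toList.reverse (PySem.Str.replace (PySem.Str.replace (PySem.Str.lower rp.2) "-" "") "_" "").toList.reverse, rp.1)], bs.2.1, bs.2.2)
                else if levR name.toList.reverse (PySem.Str.replace (PySem.Str.replace (PySem.Str.lower rp.2) "-" "") "_" "").toList.reverse = 1 then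
                  (bs.1, bs.2.1 ++ [(rp.2, levR name.toList.reverse (PySem.Str.replace (PySem.Str.replace (PySem.Str.lower rp.2) "-" "") "_" "").toList.reverse, rp.1)], bs.2.2)
                else
                  (bs.1, bs.2.1, bs.2.2 ++ [(rp.2, levR name.toList.reverse (PySem.Str.replace (PySem.Str.replace (PySem.Str.lower rp.2) "-" "") "_" "").toList.reverse, rp.1)])
              else bs)
          (b0, b1, b2)).2.1
        ++ ((PySem.List.enumerate pkgs r0).foldl
          (fun bs rp =>
            if ((PySem.Str.replace (PySem.Str.replace (PySem.Str.lower rp.2) "-" "") "_" "") == name) ∨ 2 < |PySem.Str.len (PySem.Str.replace (PySem.Str.replace (PySem.Str.lower rp.2) "-" "") "_" "") - PySem.Str.len name| then bs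
            else
              if levR name.toList.reverse (PySem.Str.replace (PySem.Str.replace (PySem.Str.lower rp.2) "-" "") "_" "").toList.reverse ≤ 2 then
                if levR name.toList.reverse (PySem.Str.replace (PySem.Str.replace (PySem.Str.lower rp.2) "-" "") "_" "").toList.reverse = 0 then
                  (bs.1 ++ [(rp.2, levR name.toList.reverse (PySem.Str.replace (PySem.Str.replace (PySem.Str.lower rp.2) "-" "") "_" "").toList.reverse, rp.1)], bs.2.1, bs.2.2)
                else if levR name.toList.reverse (PySem.Str.replace (PySem.Str.replace (PySem.Str.lower rp.2) "-" "") "_" "").toList.reverse = 1 then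
                  (bs.1, bs.2.1 ++ [(rp.2, levR name.toList.reverse (PySem.Str.replace (PySem.Str.replace (PySem.Str.lower rp.2) "-" "") "_" "").toList.reverse, rp.1)], bs.2.2)
                else
                  (bs.1, bs.2.1, bs.2.2 ++ [(rp.2, levR name.toList.reverse (PySem.Str.replace (PySem.Str.replace (PySem.Str.lower rp.2) "-" "") "_" "").toList.reverse, rp.1)])
              else bs)
          (b0, b1, b2)).2.2) := by
  induction pkgs with
  | nil =>
      intro r0 accA b0 b1 b2 hfold h0 h1 h2
      simp only [PySem.List.enumerate_nil, List.foldl_nil]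
      exact hfold
  | cons pkg pkgs ih =>
      intro r0 accA b0 b1 b2 hfold h0 h1 h2
      simp only [PySem.List.enumerate_cons, List.foldl_cons]
      generalize hN : PySem.Str.replace (PySem.Str.replace (PySem.Str.lower pkg) "-" "") "_" "" = norm
      generalize hD : levR name.toList.reverse norm.toList.reverse = d
      have hb := levR_bounds name.toList.reverse norm.toList.reverse
      rw [hD] at hb
      obtain ⟨hd0, hdabs⟩ := hb
      simp only [List.length_reverse] at hdabs
      by_cases hn : (norm == name) = true
      · rw [if_pos hn, if_pos (Or.inl hn)]
        exact ih (r0 + 1) accA b0 b1 b2 hfold (buckets_mono h0) (buckets_mono h1) (buckets_mono h2)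
      · rw [if_neg hn]
        by_cases habs : 2 < |PySem.Str.len norm - PySem.Str.len name|
        · rw [if_pos (Or.inr habs)]
          have hd3 : ¬ d ≤ 2 := by
            rw [PySem.Str.len_eq, PySem.Str.len_eq] at habs
            rw [abs_sub_le_iff] at hdabs
            rcases abs_cases ((norm.toList.length : Int) - (name.toList.length : Int)) with ⟨he, _⟩ | ⟨he, _⟩ <;>
              rw [he] at habs <;> omega
          rw [if_neg hd3]
          exact ih (r0 + 1) accA b0 b1 b2 hfold (buckets_mono h0) (buckets_mono h1) (buckets_mono h2)
        · rw [if_neg (not_or.mpr ⟨hn, habs⟩)]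
          by_cases hd2 : d ≤ 2
          · rw [if_pos hd2, if_pos hd2]
            interval_cases d
            · -- d = 0: new element joins bucket 0
              rw [if_pos rfl]
              have hfold' : (accA ++ [(pkg, (0 : Int), r0)]).foldl
                    (fun acc x => PySem.List.insertBy ltKey x acc) []
                  = (b0 ++ [(pkg, (0 : Int), r0)]) ++ b1 ++ b2 := by
                rw [List.foldl_append, hfold]
                simp only [List.foldl_cons, List.foldl_nil]
                rw [List.append_assoc]
                rw [insertBy_prefix ltKey _ b0 (b1 ++ b2)
                    (fun y hy => ltKey_eq_false _ y (by rw [(h0 y hy).1]) (h0 y hy).2),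
                  insertBy_front ltKey _ (b1 ++ b2)
                    (fun y hy => ltKey_eq_true _ y (by
                      rcases List.mem_append.mp hy with h | h
                      · rw [(h1 y h).1]; norm_num
                      · rw [(h2 y h).1]; norm_num))]
                simp [List.append_assoc]
              exact ih (r0 + 1) _ _ _ _ hfold'
                (fun x hx => by
                  rcases List.mem_append.mp hx with h | h
                  · exact ⟨(h0 x h).1, by have := (h0 x h).2; omega⟩
                  · simp at h; subst h; exact ⟨rfl, by show r0 < r0 + 1; omega⟩)
                (buckets_mono h1) (buckets_mono h2)
            · -- d = 1
              rw [if_neg (by norm_num), if_pos rfl]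
              have hfold' : (accA ++ [(pkg, (1 : Int), r0)]).foldl
                    (fun acc x => PySem.List.insertBy ltKey x acc) []
                  = b0 ++ (b1 ++ [(pkg, (1 : Int), r0)]) ++ b2 := by
                rw [List.foldl_append, hfold]
                simp only [List.foldl_cons, List.foldl_nil]
                rw [List.append_assoc]
                rw [insertBy_prefix ltKey _ b0 (b1 ++ b2)
                    (fun y hy => ltKey_eq_false _ y (by rw [(h0 y hy).1]; norm_num) (h0 y hy).2)]
                rw [insertBy_prefix ltKey _ b1 b2
                    (fun y hy => ltKey_eq_false _ y (by rw [(h1 y hy).1]) (h1 y hy).2)]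
                rw [insertBy_front ltKey _ b2
                    (fun y hy => ltKey_eq_true _ y (by rw [(h2 y hy).1]; norm_num))]
                simp [List.append_assoc]
              exact ih (r0 + 1) _ _ _ _ hfold' (buckets_mono h0)
                (fun x hx => by
                  rcases List.mem_append.mp hx with h | h
                  · exact ⟨(h1 x h).1, by have := (h1 x h).2; omega⟩
                  · simp at h; subst h; exact ⟨rfl, by show r0 < r0 + 1; omega⟩)
                (buckets_mono h2)
            · -- d = 2
              rw [if_neg (by norm_num), if_neg (by norm_num)]
              have hfold' : (accA ++ [(pkg, (2 : Int), r0)]).foldl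
                    (fun acc x => PySem.List.insertBy ltKey x acc) []
                  = b0 ++ b1 ++ (b2 ++ [(pkg, (2 : Int), r0)]) := by
                rw [List.foldl_append, hfold]
                simp only [List.foldl_cons, List.foldl_nil]
                rw [PySem.List.insertBy_of_forall_not_before ltKey _ _
                    (fun y hy => by
                      rcases List.mem_append.mp hy with h | h
                      · rcases List.mem_append.mp h with h' | h'
                        · exact ltKey_eq_false _ y (by rw [(h0 y h').1]; norm_num) (h0 y h').2
                        · exact ltKey_eq_false _ y (by rw [(h1 y h').1]; norm_num) (h1 y h').2
                      · exact ltKey_eq_false _ y (by rw [(h2 y h).1]) (h2 y h).2)]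
                simp [List.append_assoc]
              exact ih (r0 + 1) _ _ _ _ hfold' (buckets_mono h0) (buckets_mono h1)
                (fun x hx => by
                  rcases List.mem_append.mp hx with h | h
                  · exact ⟨(h2 x h).1, by have := (h2 x h).2; omega⟩
                  · simp at h; subst h; exact ⟨rfl, by show r0 < r0 + 1; omega⟩)
          · rw [if_neg hd2, if_neg hd2]
            exact ih (r0 + 1) accA b0 b1 b2 hfold (buckets_mono h0) (buckets_mono h1) (buckets_mono h2)

theorem find_similar_packages_spec : Claim_equal_find_similar_packages := by
  intro name packages _
  unfold Spec_find_similar_packages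
  have hA : find_similar_packages name packages
      = PySem.List.slice (PySem.List.sorted2
          ((PySem.List.enumerate packages 1).foldl
            (fun results rp =>
              if (PySem.Str.replace (PySem.Str.replace (PySem.Str.lower rp.2) "-" "") "_" "") == name then results
              else
                if levenshtein_distance name (PySem.Str.replace (PySem.Str.replace (PySem.Str.lower rp.2) "-" "") "_" "") ≤ 2 then
                  results ++ [(rp.2, levenshtein_distance name (PySem.Str.replace (PySem.Str.replace (PySem.Str.lower rp.2) "-" "") "_" ""), rp.1)]
                else results)
            [])
          (fun x => x.2.1) (fun x => x.2.2) false) none (some 5) := rfl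
  have hB : find_similar_packages_alt name packages
      = (fun bs : List (String × Int × Int) × List (String × Int × Int) × List (String × Int × Int) =>
          PySem.List.slice (bs.1 ++ bs.2.1 ++ bs.2.2) none (some 5))
        ((PySem.List.enumerate packages 1).foldl
          (fun bs rp =>
            let norm := PySem.Str.replace (PySem.Str.replace (PySem.Str.lower rp.2) "-" "") "_" ""
            if (norm == name) ∨ 2 < |PySem.Str.len norm - PySem.Str.len name| then bs
            else
              if b_lev name norm ≤ 2 then
                if b_lev name norm = 0 then (bs.1 ++ [(rp.2, b_lev name norm, rp.1)], bs.2.1, bs.2.2)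
                else if b_lev name norm = 1 then (bs.1, bs.2.1 ++ [(rp.2, b_lev name norm, rp.1)], bs.2.2)
                else (bs.1, bs.2.1, bs.2.2 ++ [(rp.2, b_lev name norm, rp.1)])
              else bs)
          ([], [], [])) := rfl
  rw [hA, hB]
  simp only [levA_eq, levB_eq]
  rw [sorted2_foldl]
  rw [loop_master name packages 1 [] [] [] [] (by simp) (by simp) (by simp) (by simp)]
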